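-- pv_equiv track=rewrite | github.com/KluEvo/CS337 | award_names.py | clean_dictionary
-- ===== SOURCE A (Python) =====
-- def clean_dictionary(dictionary, threshold):
--     sorted_items = sorted(dictionary.items(), key=lambda item: item[1])
--     sorted_items = list(sorted_items)
--
--     i = 0
--     while i < len(sorted_items):
--         award1, count1 = sorted_items[i]
--         words = award1.split()
--         combine_flag = False
--
--         for j in range(i + 1, len(sorted_items)):
--             award2, count2 = sorted_items[j]
--             combine_flag = True
--             for word in words:
--                 if len(word) == 1 or word in {'in', 'a', 'or', 'golden', 'globe'}:
--                     continue
--                 if word not in award2: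
--                     combine_flag = False
--                     break
--
--             if combine_flag:
--                 sorted_items[j] = (award2, count2 + count1)
--                 break
--
--         if combine_flag:
--             sorted_items.pop(i)
--         else:
--             i += 1
--
--     filtered_items = {key: count for key, count in sorted_items if count >= threshold}
--     return dict(sorted(filtered_items.items(), key=lambda item: item[1], reverse=True))
-- ===== SOURCE B (Python) =====
-- def clean_dictionary(dictionary, threshold):
--     STOP = {'in', 'a', 'or', 'golden', 'globe'}
--     items = sorted(dictionary.items(), key=lambda kv: kv[1])
--     n = len(items)
--     texts = [k for k, _ in items]
--     counts = [v for _, v in items]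
--     sig = [[w for w in t.split() if len(w) != 1 and w not in STOP] for t in texts]
--     parent = []
--     for i in range(n):
--         p = None
--         si = sig[i]
--         for j in range(i + 1, n):
--             tj = texts[j]
--             ok = True
--             for w in si:
--                 if w not in tj:
--                     ok = False
--                     break
--             if ok:
--                 p = j
--                 break
--         parent.append(p)
--     for i in range(n):
--         if parent[i] is not None:
--             counts[parent[i]] += counts[i]
--     roots = [(texts[i], counts[i]) for i in range(n)
--              if parent[i] is None and counts[i] >= threshold]
--     roots.sort(key=lambda kv: kv[1], reverse=True)
--     return dict(roots)
-- ===== Notes on version B (the rewrite author's own statement) =====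
-- stated objective: alternative
-- what changed: A repeatedly pops each merged item out of the list inside a while-loop and rescans; B makes one pass computing a parent pointer (first later award containing all significant words) for every item, cascades the counts upward through the parent array, and keeps the parentless roots.
import Mathlib
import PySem

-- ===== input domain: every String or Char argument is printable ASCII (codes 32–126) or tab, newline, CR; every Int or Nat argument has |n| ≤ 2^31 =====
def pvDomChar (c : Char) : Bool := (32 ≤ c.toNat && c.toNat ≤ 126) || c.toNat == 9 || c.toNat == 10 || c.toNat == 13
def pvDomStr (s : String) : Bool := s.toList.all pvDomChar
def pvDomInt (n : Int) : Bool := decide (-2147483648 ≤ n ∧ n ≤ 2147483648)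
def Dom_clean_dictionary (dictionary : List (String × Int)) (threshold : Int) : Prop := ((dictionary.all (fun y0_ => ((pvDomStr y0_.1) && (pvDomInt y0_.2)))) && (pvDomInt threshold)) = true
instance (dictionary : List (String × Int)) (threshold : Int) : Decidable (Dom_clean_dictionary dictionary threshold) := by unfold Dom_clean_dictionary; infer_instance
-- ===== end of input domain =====

-- B replaces A's destructive while-loop (repeatedly popping a merged item and rescanning) by a
-- single parent-pointer pass over the ascending list plus an upward count cascade; objective:
-- alternative decomposition, same asymptotic cost.

-- ===== PORT A =====
-- the set literal {'in','a','or','golden','globe'}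
def pvStop : List String := ["in", "a", "or", "golden", "globe"]

-- the inner 'for word in words' loop: combine_flag after the loop
def pvCombineA (words : List String) (award2 : String) : Bool :=
  words.all (fun word => (PySem.Str.len word == 1 || pvStop.contains word) || PySem.Str.isIn word award2)

-- the 'for j in range(i+1, len(sorted_items))' loop: 'none' = no combine happened,
-- 'some items2' = the list after 'sorted_items[j] = (award2, count2 + count1)' at the break
def pvInnerA (items : List (String × Int)) (words : List String) (count1 : Int) (j : Nat) :
    Option (List (String × Int)) :=
  if h : j < items.length then
    let kc := items[j]
    if pvCombineA words kc.1 then some (items.set j (kc.1, kc.2 + count1))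
    else pvInnerA items words count1 (j + 1)
  else none
termination_by items.length - j

-- length preservation, needed by pvLoopA's termination argument
theorem pvInnerA_length (items : List (String × Int)) (words : List String) (count1 : Int)
    (j : Nat) (out : List (String × Int)) (h : pvInnerA items words count1 j = some out) :
    out.length = items.length := by
  fun_induction pvInnerA items words count1 j with
  | case1 j hj kc hc => cases h; simp
  | case2 j hj kc hc ih => exact ih h
  | case3 j hj => cases h

-- the outer 'while i < len(sorted_items)' loop with its in-place pop
def pvLoopA (items : List (String × Int)) (i : Nat) : List (String × Int) :=
  if h : i < items.length then
    let kc := items[i]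
    match hm : pvInnerA items (PySem.Str.split₀ kc.1) kc.2 (i + 1) with
    | some items2 => pvLoopA (items2.eraseIdx i) i
    | none => pvLoopA items (i + 1)
  else items
termination_by items.length - i
decreasing_by
  · have h2 := pvInnerA_length _ _ _ _ _ hm
    rw [List.length_eraseIdx, h2, if_pos h]; omega
  · omega

def clean_dictionary (dictionary : List (String × Int)) (threshold : Int) : List (String × Int) :=
  let sorted_items := PySem.List.sorted (PySem.Dict.ofList dictionary).items (fun item => item.2) false
  let merged := pvLoopA sorted_items 0
  let filtered := merged.foldl
    (fun d kc => if kc.2 ≥ threshold then d.insert kc.1 kc.2 else d)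
    (PySem.Dict.empty : PySem.Dict String Int)
  (PySem.Dict.ofList (PySem.List.sorted filtered.items (fun item => item.2) true)).items

-- ===== PORT B =====
-- [w for w in t.split() if len(w) != 1 and w not in STOP]
def pvSigWords (t : String) : List String :=
  (PySem.Str.split₀ t).filter (fun w => (PySem.Str.len w != 1) && !(pvStop.contains w))

-- the 'for w in si' loop with its ok flag and break
def pvOkB (si : List String) (tj : String) : Bool :=
  si.all (fun w => PySem.Str.isIn w tj)

-- one iteration of the parent loop: the inner 'for j' scan with its break
def pvFindParentB (texts : List String) (sigs : List (List String)) (i : Nat) : Option Nat :=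
  (List.range' (i + 1) (texts.length - (i + 1))).find?
    (fun j => pvOkB (sigs.getD i []) (texts.getD j ""))

-- one iteration of the cascade loop: counts[parent[i]] += counts[i]
def pvCascadeStep (parents : List (Option Nat)) (cs : List Int) (i : Nat) : List Int :=
  match parents.getD i none with
  | some p => cs.set p (cs.getD p 0 + cs.getD i 0)
  | none => cs

def clean_dictionary_alt (dictionary : List (String × Int)) (threshold : Int) : List (String × Int) :=
  let items := PySem.List.sorted (PySem.Dict.ofList dictionary).items (fun kv => kv.2) false
  let n := items.length
  let texts := items.map (fun kv => kv.1)
  let counts := items.map (fun kv => kv.2)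
  let sig := texts.map pvSigWords
  let parent := (List.range n).map (fun i => pvFindParentB texts sig i)
  let counts2 := (List.range n).foldl (pvCascadeStep parent) counts
  let roots := (List.range n).filterMap (fun i =>
    if parent.getD i none = none ∧ threshold ≤ counts2.getD i 0 then
      some (texts.getD i "", counts2.getD i 0)
    else none)
  (PySem.Dict.ofList (PySem.List.sorted roots (fun kv => kv.2) true)).items

-- ===== PRECONDITION & SPEC =====
def Spec_clean_dictionary (dictionary : List (String × Int)) (threshold : Int) (out : List (String × Int)) : Prop := out = clean_dictionary_alt dictionary threshold
instance (dictionary : List (String × Int)) (threshold : Int) (out : List (String × Int)) : Decidable (Spec_clean_dictionary dictionary threshold out) := by unfold Spec_clean_dictionary; infer_instance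

-- ===== CLAIM (what is proved, stated in full; the proofs are below) =====
def Claim_equal_clean_dictionary : Prop := ∀ (dictionary : List (String × Int)) (threshold : Int), Dom_clean_dictionary dictionary threshold → Spec_clean_dictionary dictionary threshold (clean_dictionary dictionary threshold)

-- ===== LEMMAS AND PROOFS =====

-- 'sorted_items[j] = (award2, count2 + count1)' as a pure list operation
def pvBump (rest : List (String × Int)) (j : Nat) (c : Int) : List (String × Int) :=
  rest.set j ((rest.getD j ("", 0)).1, (rest.getD j ("", 0)).2 + c)

-- the merge recursion both programs compute: fold each item into the first later match
def pvProcess : List (String × Int) → List (String × Int)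
  | [] => []
  | x :: rest =>
    match rest.findIdx? (fun y => pvCombineA (PySem.Str.split₀ x.1) y.1) with
    | some j => pvProcess (pvBump rest j x.2)
    | none => x :: pvProcess rest
termination_by l => l.length
decreasing_by all_goals simp [pvBump]

theorem pvInnerA_eq (items : List (String × Int)) (words : List String) (c : Int) (j : Nat) :
    pvInnerA items words c j =
      ((items.drop j).findIdx? (fun y => pvCombineA words y.1)).map
        (fun k => items.set (j + k)
          ((items.getD (j + k) ("", 0)).1, (items.getD (j + k) ("", 0)).2 + c)) := by
  fun_induction pvInnerA items words c j with
  | case1 j hj kc hc =>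
    rw [List.drop_eq_getElem_cons hj, List.findIdx?_cons]
    simp only [kc] at hc
    rw [hc, if_pos rfl]
    simp [List.getElem?_eq_getElem hj, kc]
  | case2 j hj kc hc ih =>
    rw [List.drop_eq_getElem_cons hj, List.findIdx?_cons]
    simp only [kc] at hc
    rw [Bool.eq_false_iff.mpr hc]
    simp only [Bool.false_eq_true, if_false, Option.map_map, ih]
    congr 1
    funext k
    have : j + (k + 1) = j + 1 + k := by omega
    simp [Function.comp, this]
  | case3 j hj =>
    rw [List.drop_eq_nil_of_le (by omega)]
    simp

theorem pvLoopA_eq (items : List (String × Int)) (i : Nat) :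
    pvLoopA items i = items.take i ++ pvProcess (items.drop i) := by
  fun_induction pvLoopA items i with
  | case1 items i hi kc items2 hm ih =>
    rw [pvInnerA_eq] at hm
    rw [Option.map_eq_some_iff] at hm
    obtain ⟨k, hk, rfl⟩ := hm
    have hklt : k < (items.drop (i + 1)).length :=
      (List.findIdx?_eq_some_iff_findIdx_eq.mp hk).1
    have hkl : i + 1 + k < items.length := by
      rw [List.length_drop] at hklt; omega
    have hgd : items.getD (i + 1 + k) ("", 0) = (items.drop (i + 1)).getD k ("", 0) := by
      rw [List.getD_eq_getElem _ _ hkl, List.getD_eq_getElem _ _ hklt, List.getElem_drop]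
    set v : String × Int :=
      ((items.getD (i + 1 + k) ("", 0)).1, (items.getD (i + 1 + k) ("", 0)).2 + kc.2) with hv
    have hlen2 : (items.set (i + 1 + k) v).length = items.length := by simp
    have htk : (items.set (i + 1 + k) v).take i = items.take i := by
      rw [List.take_set, List.set_eq_of_length_le (by simp [List.length_take]; omega)]
    have hdr : (items.set (i + 1 + k) v).drop (i + 1) = (items.drop (i + 1)).set k v := by
      rw [List.drop_set, if_neg (by omega)]
      congr 1; omega
    have her : (items.set (i + 1 + k) v).eraseIdx i = items.take i ++ (items.drop (i + 1)).set k v := by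
      rw [List.eraseIdx_eq_take_drop_succ, htk, hdr]
    rw [her] at ih
    have hlt : (items.take i).length = i := by simp; omega
    rw [List.take_append_of_le_length (le_of_eq hlt.symm),
      List.drop_append_of_le_length (le_of_eq hlt.symm), List.take_take,
      List.drop_of_length_le (le_of_eq hlt), List.nil_append, Nat.min_self] at ih
    rw [her, ih]
    rw [List.drop_eq_getElem_cons hi, pvProcess]
    have hk' : (items.drop (i + 1)).findIdx?
        (fun y => pvCombineA (PySem.Str.split₀ items[i].1) y.1) = some k := hk
    rw [hk']
    congr 2
    rw [pvBump, ← hgd]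
  | case2 items i hi kc hm ih =>
    rw [pvInnerA_eq, Option.map_eq_none_iff] at hm
    rw [ih, List.drop_eq_getElem_cons hi, pvProcess]
    simp only [kc] at hm
    rw [hm]
    rw [List.take_succ_eq_append_getElem hi, List.append_assoc, List.singleton_append]
  | case3 items i hi =>
    rw [List.take_of_length_le (by omega), List.drop_eq_nil_of_le (by omega)]
    simp [pvProcess]

-- B-side abbreviations matching clean_dictionary_alt's lets (threshold-free roots)
def pvParents (l : List (String × Int)) : List (Option Nat) :=
  (List.range l.length).map (fun i =>
    pvFindParentB (l.map (fun kv => kv.1)) ((l.map (fun kv => kv.1)).map pvSigWords) i)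

def pvCounts2 (l : List (String × Int)) : List Int :=
  (List.range l.length).foldl (pvCascadeStep (pvParents l)) (l.map (fun kv => kv.2))

def pvRoots (l : List (String × Int)) : List (String × Int) :=
  (List.range l.length).filterMap (fun i =>
    if (pvParents l).getD i none = none then
      some ((l.map (fun kv => kv.1)).getD i "", (pvCounts2 l).getD i 0)
    else none)

theorem pvCombine_absorb (s u : String) :
    pvOkB (pvSigWords s) u = pvCombineA (PySem.Str.split₀ s) u := by
  unfold pvOkB pvSigWords pvCombineA
  rw [List.all_filter]
  simp [bne, Bool.not_and, Bool.not_not]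

theorem pvFindRange (full : List String) (q : String → Bool) (s : Nat) :
    (List.range' s (full.length - s)).find? (fun j => q (full.getD j "")) =
      ((full.drop s).findIdx? q).map (fun k => s + k) := by
  generalize hn : full.length - s = n
  induction n generalizing s with
  | zero =>
    rw [List.drop_eq_nil_of_le (by omega)]
    simp
  | succ n ih =>
    have hs : s < full.length := by omega
    rw [List.range'_succ, List.drop_eq_getElem_cons hs, List.find?_cons, List.findIdx?_cons,
      List.getD_eq_getElem _ _ hs]
    cases hp : q full[s] with
    | true => simp
    | false =>
      simp only [Bool.false_eq_true, if_false]
      rw [ih (s + 1) (by omega), Option.map_map]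
      congr 1
      funext k
      simp [Function.comp]; omega

theorem pvFindParentB_spec (full : List String) (sigs : List (List String)) (i : Nat) :
    pvFindParentB full sigs i =
      ((full.drop (i + 1)).findIdx? (fun u => pvOkB (sigs.getD i []) u)).map
        (fun k => i + 1 + k) := by
  unfold pvFindParentB
  exact pvFindRange full (fun u => pvOkB (sigs.getD i []) u) (i + 1)

theorem pvFindParentB_zero (t : String) (ts : List String) (s0 : List String)
    (ss : List (List String)) :
    pvFindParentB (t :: ts) (s0 :: ss) 0 =
      (ts.findIdx? (fun u => pvOkB s0 u)).map (· + 1) := by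
  rw [pvFindParentB_spec]
  simp only [List.drop_succ_cons, List.drop_zero, List.getD_cons_zero]
  congr 1; funext k; omega

theorem pvFindParentB_succ (t : String) (ts : List String) (s0 : List String)
    (ss : List (List String)) (i : Nat) :
    pvFindParentB (t :: ts) (s0 :: ss) (i + 1) = (pvFindParentB ts ss i).map (· + 1) := by
  rw [pvFindParentB_spec, pvFindParentB_spec, Option.map_map]
  simp only [List.drop_succ_cons, List.getD_cons_succ]
  congr 1; funext k; simp [Function.comp]; omega

-- texts are unchanged by a bump
theorem pvBump_map_fst (rest : List (String × Int)) (j : Nat) (c : Int) :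
    (pvBump rest j c).map (fun kv => kv.1) = rest.map (fun kv => kv.1) := by
  unfold pvBump
  by_cases hj : j < rest.length
  · rw [List.map_set, List.getD_eq_getElem _ _ hj]
    have : (rest.map (fun kv => kv.1)).set j (rest[j].1) =
        (rest.map (fun kv => kv.1)).set j ((rest.map (fun kv => kv.1))[j]'(by simpa using hj)) := by
      simp
    rw [this, List.set_getElem_self]
  · rw [List.set_eq_of_length_le (by omega)]

theorem pvBump_map_snd (rest : List (String × Int)) (j : Nat) (c : Int) (hj : j < rest.length) :
    (pvBump rest j c).map (fun kv => kv.2) =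
      (rest.map (fun kv => kv.2)).set j ((rest.map (fun kv => kv.2)).getD j 0 + c) := by
  unfold pvBump
  rw [List.map_set, List.getD_eq_getElem _ _ hj, List.getD_eq_getElem _ _ (by simpa using hj)]
  simp

theorem pvParents_cons (x : String × Int) (rest : List (String × Int)) :
    pvParents (x :: rest) =
      ((rest.map (fun kv => kv.1)).findIdx? (fun u => pvOkB (pvSigWords x.1) u)).map (· + 1) ::
        (pvParents rest).map (Option.map (· + 1)) := by
  unfold pvParents
  rw [List.length_cons, List.range_succ_eq_map, List.map_cons, List.map_map]
  simp only [List.map_cons]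
  rw [pvFindParentB_zero]
  congr 1
  rw [List.map_map, List.map_map]
  apply List.map_congr_left
  intro i _
  simp [Function.comp, Nat.succ_eq_add_one, pvFindParentB_succ, List.map_map]

-- a fold whose steps preserve a fixed head acts on the tail
theorem pvFoldl_cons_shift (F G : List Int → Nat → List Int) (c : Int) (l : List Nat)
    (cs : List Int) (h : ∀ cs i, i ∈ l → F (c :: cs) (i + 1) = c :: G cs i) :
    ((l.map (· + 1)).foldl F (c :: cs)) = c :: l.foldl G cs := by
  induction l generalizing cs with
  | nil => simp
  | cons a l ih =>
    rw [List.map_cons, List.foldl_cons, List.foldl_cons,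
      h cs a (by simp), ih (G cs a) (fun cs i hi => h cs i (by simp [hi]))]

theorem pvParents_length (l : List (String × Int)) : (pvParents l).length = l.length := by
  simp [pvParents]

theorem pvGetD_map_optSucc (P : List (Option Nat)) (i : Nat) (hi : i < P.length) :
    (P.map (Option.map (· + 1))).getD i none = Option.map (· + 1) (P.getD i none) := by
  rw [List.getD_eq_getElem _ _ (by simpa), List.getD_eq_getElem _ _ hi, List.getElem_map]

theorem pvCascade_shift (x : String × Int) (rest : List (String × Int)) (cs : List Int)
    (i : Nat) (hi : i < rest.length) :
    pvCascadeStep (pvParents (x :: rest)) (x.2 :: cs) (i + 1) =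
      x.2 :: pvCascadeStep (pvParents rest) cs i := by
  unfold pvCascadeStep
  rw [pvParents_cons, List.getD_cons_succ,
    pvGetD_map_optSucc _ _ (by rw [pvParents_length]; omega)]
  cases hp : (pvParents rest).getD i none with
  | none => rfl
  | some p => simp [List.set_cons_succ]

theorem pvCounts2_cons (x : String × Int) (rest : List (String × Int)) :
    pvCounts2 (x :: rest) =
      match (rest.map (fun kv => kv.1)).findIdx? (fun u => pvOkB (pvSigWords x.1) u) with
      | some j => x.2 :: (List.range rest.length).foldl (pvCascadeStep (pvParents rest))
          ((rest.map (fun kv => kv.2)).set j ((rest.map (fun kv => kv.2)).getD j 0 + x.2))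
      | none => x.2 :: pvCounts2 rest := by
  unfold pvCounts2
  rw [List.length_cons, List.range_succ_eq_map, List.foldl_cons, List.map_cons]
  have h0 : pvCascadeStep (pvParents (x :: rest)) (x.2 :: rest.map (fun kv => kv.2)) 0 =
      match (rest.map (fun kv => kv.1)).findIdx? (fun u => pvOkB (pvSigWords x.1) u) with
      | some j => x.2 :: (rest.map (fun kv => kv.2)).set j
          ((rest.map (fun kv => kv.2)).getD j 0 + x.2)
      | none => x.2 :: rest.map (fun kv => kv.2) := by
    unfold pvCascadeStep
    rw [pvParents_cons, List.getD_cons_zero]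
    cases hf : (rest.map (fun kv => kv.1)).findIdx? (fun u => pvOkB (pvSigWords x.1) u) with
    | none => rfl
    | some j => simp [List.set_cons_succ]
  rw [h0]
  have hshift : ∀ (cs : List Int),
      ((List.range rest.length).map Nat.succ).foldl
        (pvCascadeStep (pvParents (x :: rest))) (x.2 :: cs) =
      x.2 :: (List.range rest.length).foldl (pvCascadeStep (pvParents rest)) cs := by
    intro cs
    have hm : (List.range rest.length).map Nat.succ = (List.range rest.length).map (· + 1) := by
      simp
    rw [hm]
    exact pvFoldl_cons_shift _ _ _ _ _
      (fun cs i hi => pvCascade_shift x rest cs i (List.mem_range.mp hi))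
  cases hf : (rest.map (fun kv => kv.1)).findIdx? (fun u => pvOkB (pvSigWords x.1) u) with
  | none => exact hshift _
  | some j => exact hshift _

theorem pvRoots_tail (x : String × Int) (rest rest2 : List (String × Int))
    (hlen : rest2.length = rest.length)
    (hfst : rest2.map (fun kv => kv.1) = rest.map (fun kv => kv.1))
    (hC : pvCounts2 (x :: rest) = x.2 :: pvCounts2 rest2) :
    ((List.range rest.length).map Nat.succ).filterMap
      (fun i => if (pvParents (x :: rest)).getD i none = none then
          some (((x :: rest).map (fun kv => kv.1)).getD i "", (pvCounts2 (x :: rest)).getD i 0)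
        else none)
    = pvRoots rest2 := by
  have hP : pvParents rest2 = pvParents rest := by
    unfold pvParents; rw [hlen, hfst]
  rw [List.filterMap_map]
  unfold pvRoots
  rw [hlen, hP]
  apply List.filterMap_congr
  intro i hi
  have hi2 : i < rest.length := List.mem_range.mp hi
  simp only [Function.comp, Nat.succ_eq_add_one]
  rw [pvParents_cons, List.getD_cons_succ,
    pvGetD_map_optSucc _ _ (by rw [pvParents_length]; omega),
    hC, List.map_cons, List.getD_cons_succ, List.getD_cons_succ, hfst]
  cases hp : (pvParents rest).getD i none with
  | none => simp
  | some p => simp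

theorem pvRoots_eq_process (l : List (String × Int)) : pvRoots l = pvProcess l := by
  fun_induction pvProcess l with
  | case1 => simp [pvRoots]
  | case2 x rest j h ih =>
    have hpred : ((fun u => pvOkB (pvSigWords x.1) u) ∘ (fun kv : String × Int => kv.1)) =
        (fun y : String × Int => pvCombineA (PySem.Str.split₀ x.1) y.1) := by
      funext y; simp [Function.comp, pvCombine_absorb]
    have hB : (rest.map (fun kv => kv.1)).findIdx? (fun u => pvOkB (pvSigWords x.1) u) = some j := by
      rw [List.findIdx?_map, hpred, h]
    have hj : j < rest.length := (List.findIdx?_eq_some_iff_findIdx_eq.mp h).1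
    have hlen : (pvBump rest j x.2).length = rest.length := by simp [pvBump]
    have hCb : pvCounts2 (pvBump rest j x.2) = (List.range rest.length).foldl
        (pvCascadeStep (pvParents rest))
        ((rest.map (fun kv => kv.2)).set j ((rest.map (fun kv => kv.2)).getD j 0 + x.2)) := by
      unfold pvCounts2
      rw [pvBump_map_snd _ _ _ hj, hlen]
      have hP : pvParents (pvBump rest j x.2) = pvParents rest := by
        unfold pvParents; rw [pvBump_map_fst, hlen]
      rw [hP]
    have hC : pvCounts2 (x :: rest) = x.2 :: pvCounts2 (pvBump rest j x.2) := by
      rw [pvCounts2_cons, hB, hCb]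
    rw [← ih]
    unfold pvRoots
    rw [List.length_cons, List.range_succ_eq_map, List.filterMap_cons]
    have h0 : (pvParents (x :: rest)).getD 0 none = some (j + 1) := by
      rw [pvParents_cons, List.getD_cons_zero, hB]; rfl
    rw [h0]
    simp only [reduceCtorEq, if_false]
    exact pvRoots_tail x rest (pvBump rest j x.2) hlen (pvBump_map_fst rest j x.2) hC
  | case3 x rest h ih =>
    have hpred : ((fun u => pvOkB (pvSigWords x.1) u) ∘ (fun kv : String × Int => kv.1)) =
        (fun y : String × Int => pvCombineA (PySem.Str.split₀ x.1) y.1) := by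
      funext y; simp [Function.comp, pvCombine_absorb]
    have hB : (rest.map (fun kv => kv.1)).findIdx? (fun u => pvOkB (pvSigWords x.1) u) = none := by
      rw [List.findIdx?_map, hpred, h]
    have hC : pvCounts2 (x :: rest) = x.2 :: pvCounts2 rest := by
      rw [pvCounts2_cons, hB]
    rw [← ih]
    unfold pvRoots
    rw [List.length_cons, List.range_succ_eq_map, List.filterMap_cons]
    have h0 : (pvParents (x :: rest)).getD 0 none = none := by
      rw [pvParents_cons, List.getD_cons_zero, hB]; rfl
    rw [h0]
    rw [pvRoots_tail x rest rest rfl rfl hC]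
    rw [List.map_cons, List.getD_cons_zero, hC, List.getD_cons_zero]
    simp [pvRoots]

theorem pvProcess_fst_sublist (l : List (String × Int)) :
    ((pvProcess l).map (fun kv => kv.1)).Sublist (l.map (fun kv => kv.1)) := by
  fun_induction pvProcess l with
  | case1 => simp
  | case2 x rest j h ih =>
    rw [pvBump_map_fst] at ih
    rw [List.map_cons]
    exact ih.trans (List.sublist_cons_self _ _)
  | case3 x rest h ih =>
    rw [List.map_cons, List.map_cons]
    exact ih.cons₂ _

theorem pvFilterMap_threshold (l : List Nat) (P : Nat → Option Nat) (g1 : Nat → String)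
    (g2 : Nat → Int) (th : Int) :
    l.filterMap (fun i => if P i = none ∧ th ≤ g2 i then some (g1 i, g2 i) else none)
    = (l.filterMap (fun i => if P i = none then some (g1 i, g2 i) else none)).filter
        (fun b => decide (th ≤ b.2)) := by
  induction l with
  | nil => simp
  | cons a l ih =>
    rw [List.filterMap_cons, List.filterMap_cons]
    by_cases h1 : P a = none
    · by_cases h2 : th ≤ g2 a
      · simp [h1, h2, ih]
      · simp [h1, h2, ih]
    · simp [h1, ih]

theorem pvMain (dictionary : List (String × Int)) (threshold : Int) :
    clean_dictionary dictionary threshold = clean_dictionary_alt dictionary threshold := by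
  simp only [clean_dictionary, clean_dictionary_alt]
  set S := PySem.List.sorted (PySem.Dict.ofList dictionary).items (fun kv => kv.2) false with hS
  have hmerge : pvLoopA S 0 = pvProcess S := by
    rw [pvLoopA_eq]; simp
  have hnd : (S.map (fun kv => kv.1)).Nodup := by
    have hperm : S.Perm (PySem.Dict.ofList dictionary).items :=
      PySem.List.sorted_perm _ _ _
    have hk : ((PySem.Dict.ofList dictionary).items.map (fun kv => kv.1)).Nodup :=
      PySem.Dict.nodup_keys_ofList dictionary
    exact ((hperm.map (fun kv => kv.1)).nodup_iff).mpr hk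
  have hnd3 : (((pvProcess S).filter (fun kc => decide (threshold ≤ kc.2))).map
      (fun kv => kv.1)).Nodup :=
    (hnd.sublist (pvProcess_fst_sublist S)).sublist (List.Sublist.map _ List.filter_sublist)
  have hA : ((pvProcess S).foldl
      (fun d kc => if kc.2 ≥ threshold then d.insert kc.1 kc.2 else d)
      (PySem.Dict.empty : PySem.Dict String Int)).items =
      (pvProcess S).filter (fun kc => decide (threshold ≤ kc.2)) := by
    rw [PySem.List.foldl_ite_eq_foldl_filter (fun kc : String × Int => kc.2 ≥ threshold)
      (fun (d : PySem.Dict String Int) (kc : String × Int) => d.insert kc.1 kc.2)]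
    have hg : (fun kc : String × Int => decide (kc.2 ≥ threshold)) =
        (fun kc : String × Int => decide (threshold ≤ kc.2)) := rfl
    rw [hg]
    rw [PySem.Dict.items_foldl_insert_fresh
      ((pvProcess S).filter (fun kc => decide (threshold ≤ kc.2)))
      (fun kc : String × Int => kc.1) (fun kc : String × Int => kc.2) PySem.Dict.empty
      (by intro a _; simp) hnd3]
    simp [PySem.Dict.empty]
  have hB : (List.range S.length).filterMap (fun i =>
      if ((List.range S.length).map (fun i => pvFindParentB (S.map (fun kv => kv.1)) ((S.map (fun kv => kv.1)).map pvSigWords) i)).getD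
            i none = none ∧
          threshold ≤ ((List.range S.length).foldl
            (pvCascadeStep ((List.range S.length).map
              (fun i => pvFindParentB (S.map (fun kv => kv.1)) ((S.map (fun kv => kv.1)).map pvSigWords) i)))
            (S.map (fun kv => kv.2))).getD i 0 then
        some ((S.map (fun kv => kv.1)).getD i "",
          ((List.range S.length).foldl
            (pvCascadeStep ((List.range S.length).map
              (fun i => pvFindParentB (S.map (fun kv => kv.1)) ((S.map (fun kv => kv.1)).map pvSigWords) i)))
            (S.map (fun kv => kv.2))).getD i 0)
      else none) =
      (pvProcess S).filter (fun kc => decide (threshold ≤ kc.2)) := by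
    rw [pvFilterMap_threshold]
    rw [← pvRoots_eq_process]
    rfl
  rw [hmerge, hA, hB]

-- ===== VERDICT (by name: the statement is the Claim_ definition above) =====
theorem clean_dictionary_spec : Claim_equal_clean_dictionary := by
  intro d t _
  show _ = _
  exact pvMain d t
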